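-- pv_equiv track=rewrite | github.com/Abdulaziz-04/Algorithmic-Toolbox | week3_greedy_algorithms/3_car_fueling/car_fueling.py | compute_min_refills
-- ===== SOURCE A (Python) =====
-- def compute_min_refills(distance, tank, stops):
--     stops.insert(0,0)
--     stops.append(distance)
--     refillCount=0
--     w=len(stops)-1
--     c=0
--     while(c!=w):
--         l=c
--         while(c!=w and stops[c+1]-stops[l]<=tank):
--             c+=1
--         if(c==l):
--             return -1
--         if(c!=w):
--             refillCount+=1
--     return refillCount
-- ===== SOURCE B (Python) =====
-- def compute_min_refills(distance, tank, stops):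
--     stops.insert(0, 0)
--     stops.append(distance)
--     refills = 0
--     driven = 0  # distance driven since the last refill
--     for hop in (b - a for a, b in zip(stops, stops[1:])):
--         driven += hop
--         if driven > tank:        # current fill does not cover the stretch
--             refills += 1         # take fuel at the stop before this hop
--             driven = hop         # only this hop on the fresh fill
--             if driven > tank:    # a single hop longer than a full tank
--                 return -1
--     return refills
-- ===== Notes on version B (the rewrite author's own statement) =====
-- stated objective: alternative
-- what changed: B first forms the hop-length (difference) sequence of adjacent stops and folds a consumed-fuel accumulator over it, resetting the accumulator at each refill, instead of A's nested while-loops that advance a shared pointer and compare absolute stop positions against the remembered refill stop; correctness rests on the telescoping identity sum of hops since the last refill = current position minus refill position.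
import Mathlib
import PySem

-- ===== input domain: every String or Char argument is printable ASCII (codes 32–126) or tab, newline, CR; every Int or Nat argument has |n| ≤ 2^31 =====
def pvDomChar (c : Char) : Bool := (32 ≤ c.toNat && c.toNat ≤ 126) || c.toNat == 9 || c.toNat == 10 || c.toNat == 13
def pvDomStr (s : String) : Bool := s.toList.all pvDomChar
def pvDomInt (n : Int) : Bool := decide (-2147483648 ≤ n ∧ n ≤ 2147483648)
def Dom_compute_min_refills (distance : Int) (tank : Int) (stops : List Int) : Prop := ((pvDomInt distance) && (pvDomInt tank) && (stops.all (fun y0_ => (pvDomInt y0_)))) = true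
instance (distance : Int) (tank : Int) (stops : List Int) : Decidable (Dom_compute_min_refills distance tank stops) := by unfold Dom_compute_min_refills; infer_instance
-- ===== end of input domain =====

-- B folds a consumed-fuel accumulator over the hop-length (difference) sequence, never
-- comparing absolute positions against a remembered refill stop as A does; same O(n) cost.
-- Equivalence is about the return value; both Pythons mutate `stops` identically
-- (insert 0 at front, append distance).

-- ===== PORT A =====
-- inner while loop: advance c while c != w and stops[c+1]-stops[l] <= tank
-- (fuel = w - c bounds the iteration count exactly; it only makes the recursion total)
def pvInnerA (arr : List Int) (tank : Int) (w l : Nat) : Nat → Nat → Nat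
  | c, 0 => c
  | c, fuel + 1 =>
    if c ≠ w ∧ arr.getD (c + 1) 0 - arr.getD l 0 ≤ tank then
      pvInnerA arr tank w l (c + 1) fuel
    else c

-- outer while loop: while c != w: l := c; inner; if c == l return -1; if c != w refill += 1
def pvOuterA (arr : List Int) (tank : Int) (w : Nat) : Int → Nat → Nat → Int
  | refill, _, 0 => refill
  | refill, c, fuel + 1 =>
    if c = w then refill
    else
      let l := c
      let c' := pvInnerA arr tank w l c (w - c)
      if c' = l then -1
      else if c' ≠ w then pvOuterA arr tank w (refill + 1) c' fuel
      else refill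

def compute_min_refills (distance : Int) (tank : Int) (stops : List Int) : Int :=
  let arr := 0 :: (stops ++ [distance])   -- stops.insert(0,0); stops.append(distance)
  let w := arr.length - 1
  pvOuterA arr tank w 0 0 w

-- ===== PORT B =====
-- (b - a for a, b in zip(stops, stops[1:]))
def pvHops (arr : List Int) : List Int :=
  (arr.zip (arr.drop 1)).map (fun p => p.2 - p.1)

-- for hop in hops with state (refills, driven); early return -1
def pvGoB (tank : Int) : List Int → Int → Int → Int
  | [], refills, _ => refills
  | hop :: rest, refills, driven =>
    let d := driven + hop
    if d > tank then
      if hop > tank then -1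
      else pvGoB tank rest (refills + 1) hop
    else pvGoB tank rest refills d

def compute_min_refills_alt (distance : Int) (tank : Int) (stops : List Int) : Int :=
  let arr := 0 :: (stops ++ [distance])   -- stops.insert(0,0); stops.append(distance)
  pvGoB tank (pvHops arr) 0 0

-- ===== PRECONDITION & SPEC =====
def Spec_compute_min_refills (distance : Int) (tank : Int) (stops : List Int) (out : Int) : Prop := out = compute_min_refills_alt distance tank stops
instance (distance : Int) (tank : Int) (stops : List Int) (out : Int) : Decidable (Spec_compute_min_refills distance tank stops out) := by unfold Spec_compute_min_refills; infer_instance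

-- ===== CLAIM (what is proved, stated in full; the proofs are below) =====
def Claim_equal_compute_min_refills : Prop := ∀ (distance : Int) (tank : Int) (stops : List Int), Dom_compute_min_refills distance tank stops → Spec_compute_min_refills distance tank stops (compute_min_refills distance tank stops)

-- ===== LEMMAS AND PROOFS =====

-- proof-only bridge: the flat indexed scan both sides are compared against
-- (state: i = current index, count, last = position value of the last refill)
def pvFlat (arr : List Int) (tank : Int) : Nat → Int → Int → Int
  | i, count, last =>
    if h : i < arr.length then
      if arr.getD i 0 - last > tank then
        if arr.getD i 0 - arr.getD (i - 1) 0 > tank then -1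
        else pvFlat arr tank (i + 1) (count + 1) (arr.getD (i - 1) 0)
      else pvFlat arr tank (i + 1) count last
    else count
  termination_by i _ _ => arr.length - i

-- the inner while loop only advances c; it returns c' with c ≤ c' ≤ w,
-- and (given enough fuel) c' = w or the advancing condition fails at c'.
theorem pvInnerA_spec (arr : List Int) (tank : Int) (w l : Nat) :
    ∀ fuel c, c ≤ w → w - c ≤ fuel →
      c ≤ pvInnerA arr tank w l c fuel ∧ pvInnerA arr tank w l c fuel ≤ w ∧
        (pvInnerA arr tank w l c fuel = w ∨
         arr.getD (pvInnerA arr tank w l c fuel + 1) 0 - arr.getD l 0 > tank) := by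
  intro fuel
  induction fuel with
  | zero =>
    intro c hcw hf
    have : c = w := by omega
    simp [pvInnerA, this]
  | succ fuel ih =>
    intro c hcw hf
    simp only [pvInnerA]
    by_cases h : c ≠ w ∧ arr.getD (c + 1) 0 - arr.getD l 0 ≤ tank
    · rw [if_pos h]
      have := ih (c + 1) (by omega) (by omega)
      exact ⟨by omega, this.2.1, this.2.2⟩
    · rw [if_neg h]
      refine ⟨le_refl _, hcw, ?_⟩
      by_cases hw : c = w
      · exact Or.inl hw
      · right
        rcases not_and_or.mp h with h1 | h2
        · exact absurd hw (by simpa using h1)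
        · omega

-- while the inner loop advances, pvFlat (with last = arr[l]) skips the same indices
theorem pvInnerA_flat (arr : List Int) (tank : Int) (w l : Nat)
    (hw : arr.length = w + 1) (count : Int) :
    ∀ fuel c, c ≤ w → w - c ≤ fuel →
      pvFlat arr tank (c + 1) count (arr.getD l 0) =
      pvFlat arr tank (pvInnerA arr tank w l c fuel + 1) count (arr.getD l 0) := by
  intro fuel
  induction fuel with
  | zero => intro c _ _; simp [pvInnerA]
  | succ fuel ih =>
    intro c hcw hf
    simp only [pvInnerA]
    by_cases h : c ≠ w ∧ arr.getD (c + 1) 0 - arr.getD l 0 ≤ tank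
    · rw [if_pos h, ← ih (c + 1) (by omega) (by omega)]
      rw [pvFlat]
      rw [dif_pos (show c + 1 < arr.length by omega)]
      rw [if_neg (show ¬ (arr.getD (c + 1) 0 - arr.getD l 0 > tank) by omega)]
    · rw [if_neg h]

-- main correspondence for A: the outer loop from refill point l equals pvFlat from i = l+1
theorem pvOuterA_flat (arr : List Int) (tank : Int) (w : Nat)
    (hw : arr.length = w + 1) :
    ∀ fuelO l refill, l ≤ w → w - l ≤ fuelO →
      pvOuterA arr tank w refill l fuelO =
      pvFlat arr tank (l + 1) refill (arr.getD l 0) := by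
  intro fuelO
  induction fuelO with
  | zero =>
    intro l refill hlw hf
    rw [pvFlat, dif_neg (show ¬ (l + 1 < arr.length) by omega)]
    rfl
  | succ fuelO ih =>
    intro l refill hlw hf
    by_cases hlwe : l = w
    · rw [pvFlat, dif_neg (show ¬ (l + 1 < arr.length) by omega)]
      simp only [pvOuterA]
      rw [if_pos hlwe]
    · have hlt : l < w := by omega
      simp only [pvOuterA]
      rw [if_neg hlwe]
      rw [pvInnerA_flat arr tank w l hw refill (w - l) l (le_of_lt hlt) (le_refl _)]
      obtain ⟨hlc, hcw2, hstop⟩ :=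
        pvInnerA_spec arr tank w l (w - l) l (le_of_lt hlt) (le_refl _)
      set c' := pvInnerA arr tank w l l (w - l) with hc'
      by_cases hcl : c' = l
      · have hviol : arr.getD (c' + 1) 0 - arr.getD l 0 > tank := by
          rcases hstop with h | h
          · omega
          · exact h
        rw [if_pos hcl, pvFlat, dif_pos (show c' + 1 < arr.length by omega)]
        rw [if_pos hviol, Nat.add_sub_cancel]
        rw [if_pos (show arr.getD (c' + 1) 0 - arr.getD c' 0 > tank by rw [hcl] at hviol ⊢; exact hviol)]
      · have hltc : l < c' := by omega
        rw [if_neg hcl]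
        by_cases hcwe : c' = w
        · rw [if_neg (not_not_intro hcwe), pvFlat,
              dif_neg (show ¬ (c' + 1 < arr.length) by omega)]
        · have hviol : arr.getD (c' + 1) 0 - arr.getD l 0 > tank := by
            rcases hstop with h | h
            · exact absurd h hcwe
            · exact h
          rw [if_pos hcwe]
          rw [ih c' (refill + 1) hcw2 (by omega)]
          conv_rhs => rw [pvFlat]
          rw [dif_pos (show c' + 1 < arr.length by omega), if_pos hviol, Nat.add_sub_cancel]
          by_cases hgap : arr.getD (c' + 1) 0 - arr.getD c' 0 > tank
          · rw [if_pos hgap]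
            rw [pvFlat, dif_pos (show c' + 1 < arr.length by omega), Nat.add_sub_cancel,
                if_pos hgap, if_pos hgap]
          · rw [if_neg hgap]
            rw [pvFlat, dif_pos (show c' + 1 < arr.length by omega), Nat.add_sub_cancel,
                if_neg hgap]

theorem pvHops_length (arr : List Int) : (pvHops arr).length = arr.length - 1 := by
  simp [pvHops]

theorem pvHops_getElem (arr : List Int) (j : Nat) (h : j < (pvHops arr).length) :
    (pvHops arr)[j] = arr.getD (j + 1) 0 - arr.getD j 0 := by
  have hl : (pvHops arr).length = arr.length - 1 := pvHops_length arr
  have hj1 : j + 1 < arr.length := by omega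
  have hj : j < arr.length := by omega
  simp [pvHops, List.getD, List.getElem?_eq_getElem hj1, List.getElem?_eq_getElem hj]

-- correspondence for B: the flat scan from index i with last-refill value `last`
-- equals the hop fold over the remaining hops with driven = arr[i-1] - last
theorem pvFlat_goB (arr : List Int) (tank : Int) :
    ∀ k i count last, arr.length - i ≤ k → 1 ≤ i →
      pvFlat arr tank i count last =
      pvGoB tank ((pvHops arr).drop (i - 1)) count (arr.getD (i - 1) 0 - last) := by
  intro k
  induction k with
  | zero =>
    intro i count last hk hi
    have hge : ¬ i < arr.length := by omega
    have hdrop : (pvHops arr).drop (i - 1) = [] := by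
      apply List.drop_eq_nil_of_le
      rw [pvHops_length]; omega
    rw [pvFlat, dif_neg hge, hdrop, pvGoB]
  | succ k ih =>
    intro i count last hk hi
    by_cases hlt : i < arr.length
    · have hjh : i - 1 < (pvHops arr).length := by rw [pvHops_length]; omega
      have hdrop : (pvHops arr).drop (i - 1) =
          (pvHops arr)[i - 1] :: (pvHops arr).drop i := by
        rw [show (pvHops arr).drop i = (pvHops arr).drop ((i - 1) + 1) by congr 1; omega]
        rw [← List.getElem_cons_drop]
      have hhop : (pvHops arr)[i - 1] = arr.getD i 0 - arr.getD (i - 1) 0 := by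
        rw [pvHops_getElem]
        congr 2
        omega
      rw [pvFlat, dif_pos hlt, hdrop, hhop, pvGoB]
      have hd : arr.getD (i - 1) 0 - last + (arr.getD i 0 - arr.getD (i - 1) 0) =
          arr.getD i 0 - last := by ring
      rw [hd]
      by_cases htr : arr.getD i 0 - last > tank
      · rw [if_pos htr, if_pos htr]
        by_cases hgap : arr.getD i 0 - arr.getD (i - 1) 0 > tank
        · rw [if_pos hgap, if_pos hgap]
        · rw [if_neg hgap, if_neg hgap]
          rw [ih (i + 1) (count + 1) (arr.getD (i - 1) 0) (by omega) (by omega)]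
          simp only [Nat.add_sub_cancel]
      · rw [if_neg htr, if_neg htr]
        rw [ih (i + 1) count last (by omega) (by omega)]
        simp only [Nat.add_sub_cancel]
    · have hdrop : (pvHops arr).drop (i - 1) = [] := by
        apply List.drop_eq_nil_of_le
        rw [pvHops_length]; omega
      rw [pvFlat, dif_neg hlt, hdrop, pvGoB]

-- ===== VERDICT (by name: the statement is the Claim_ definition above) =====
theorem compute_min_refills_spec : Claim_equal_compute_min_refills := by
  intro distance tank stops _
  show compute_min_refills distance tank stops = compute_min_refills_alt distance tank stops
  simp only [compute_min_refills, compute_min_refills_alt]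
  rw [pvOuterA_flat ((0 : Int) :: (stops ++ [distance])) tank
        (((0 : Int) :: (stops ++ [distance])).length - 1) (by simp)
        (((0 : Int) :: (stops ++ [distance])).length - 1) 0 0 (Nat.zero_le _) (le_refl _)]
  simp only [Nat.zero_add, List.getD_cons_zero]
  rw [pvFlat_goB ((0 : Int) :: (stops ++ [distance])) tank
        (((0 : Int) :: (stops ++ [distance])).length) 1 0 0 (by omega) (le_refl _)]
  simp [List.getD]
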